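-- pv_equiv track=rewrite | github.com/juliet2112/Graph-based-algorithms | lab1/v2.py | dfs
-- ===== SOURCE A (Python) =====
-- def dfs(G,s,t,min):
--     def dfsvisit(G, v):
--         visited[v] = True
--         for u,w in G[v]:
--             if not visited[u] and w >= min:
--                 dfsvisit(G, u)
--
--     visited = [False for _ in range(len(G))]
--     dfsvisit(G, s)
--     return visited[t]
-- ===== SOURCE B (Python) =====
-- def dfs(G, s, t, min):
--     # Iterative breadth-first search by layers instead of recursive DFS:
--     # a frontier list is expanded wholesale each round; only reachability
--     # (never visit order) matters, so the reached set is identical.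
--     n = len(G)
--     reached = [False] * n
--     reached[s] = True
--     frontier = [s]
--     while frontier:
--         nxt = []
--         for v in frontier:
--             for u, w in G[v]:
--                 if w >= min and not reached[u]:
--                     reached[u] = True
--                     nxt.append(u)
--         frontier = nxt
--     return reached[t]
-- ===== Notes on version B (the rewrite author's own statement) =====
-- stated objective: alternative
-- what changed: Replaces the recursive depth-first traversal (call stack, one vertex at a time) with an iterative layer-by-layer breadth-first search that expands a whole frontier list per round into a reached array.
-- outside the precondition, e.g. on dfs([[], [(5, 0)]], 0, 0, 0): A returns True, B returns True
import Mathlib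
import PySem

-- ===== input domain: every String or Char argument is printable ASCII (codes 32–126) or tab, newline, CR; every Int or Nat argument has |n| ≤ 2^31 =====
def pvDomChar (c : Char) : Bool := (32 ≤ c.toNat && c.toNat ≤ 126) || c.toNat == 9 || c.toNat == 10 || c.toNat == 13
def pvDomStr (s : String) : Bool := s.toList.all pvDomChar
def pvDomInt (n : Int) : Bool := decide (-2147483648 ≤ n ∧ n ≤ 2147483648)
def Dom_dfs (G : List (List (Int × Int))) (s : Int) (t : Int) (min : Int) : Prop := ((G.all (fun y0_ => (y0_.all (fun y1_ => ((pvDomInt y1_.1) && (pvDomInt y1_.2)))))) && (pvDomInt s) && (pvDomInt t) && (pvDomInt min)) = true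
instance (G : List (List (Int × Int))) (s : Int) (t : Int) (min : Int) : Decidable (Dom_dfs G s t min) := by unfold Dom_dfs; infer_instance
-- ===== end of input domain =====

-- B replaces A's recursive DFS with an iterative layer-by-layer BFS (no observable mutation in A).

-- ===== PORT A =====
-- recursive helper dfsvisit; the fuel |G|+1 only makes the recursion total (each nesting level
-- consumes one unvisited vertex, so on admitted inputs the fuel is never exhausted)
def visitA (G : List (List (Int × Int))) (mn : Int) : Nat → Int → List Bool → List Bool
  | 0, _, vis => vis
  | f+1, v, vis =>
    ((PySem.List.pyGet? G v).getD []).foldl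
      (fun acc uw =>
        if PySem.List.pyGet? acc uw.1 = some false ∧ mn ≤ uw.2 then
          visitA G mn f uw.1 acc
        else acc)
      (PySem.List.pySetD vis v true)

def dfs (G : List (List (Int × Int))) (s : Int) (t : Int) (min : Int) : Bool :=
  (PySem.List.pyGet? (visitA G min (G.length + 1) s (List.replicate G.length false)) t).getD false

-- ===== PORT B =====
-- body of one while-round for a single frontier vertex v: scan its adjacency list
def stepB (G : List (List (Int × Int))) (mn : Int) (st : List Bool × List Int) (v : Int) :
    List Bool × List Int :=
  ((PySem.List.pyGet? G v).getD []).foldl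
    (fun st2 uw =>
      if mn ≤ uw.2 ∧ PySem.List.pyGet? st2.1 uw.1 = some false then
        (PySem.List.pySetD st2.1 uw.1 true, st2.2 ++ [uw.1])
      else st2) st

-- the while-loop; fuel |G|+1 only makes it total (every round with a non-empty frontier
-- was fed by newly marked vertices, of which there are at most |G|)
def bfsLoop (G : List (List (Int × Int))) (mn : Int) : Nat → List Bool → List Int → List Bool
  | 0, reached, _ => reached
  | f+1, reached, frontier =>
    if frontier = [] then reached
    else
      let st := frontier.foldl (stepB G mn) (reached, [])
      bfsLoop G mn f st.1 st.2

def dfs_alt (G : List (List (Int × Int))) (s : Int) (t : Int) (min : Int) : Bool :=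
  let reached := PySem.List.pySetD (List.replicate G.length false) s true
  (PySem.List.pyGet? (bfsLoop G min (G.length + 1) reached [s]) t).getD false

-- ===== PRECONDITION & SPEC =====
-- Pre_ excludes inputs with an out-of-range source, target or edge endpoint: A raises IndexError
-- on visited[...] whenever the traversal reaches such an index, and out-of-range endpoints sitting
-- in never-reached adjacency lists are excluded conservatively with the rest.
def Pre_dfs (G : List (List (Int × Int))) (s : Int) (t : Int) (min : Int) : Prop :=
  PySem.Raise.InRange G.length s ∧ PySem.Raise.InRange G.length t ∧
    ∀ adj ∈ G, ∀ uw ∈ adj, PySem.Raise.InRange G.length uw.1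
instance (G : List (List (Int × Int))) (s : Int) (t : Int) (min : Int) : Decidable (Pre_dfs G s t min) := by
  unfold Pre_dfs PySem.Raise.InRange; infer_instance

def pvWitness_dfs : (List (List (Int × Int))) × Int × Int × Int := ([[(1, 5)], []], 0, 1, 3)

def Spec_dfs (G : List (List (Int × Int))) (s : Int) (t : Int) (min : Int) (out : Bool) : Prop := out = dfs_alt G s t min
instance (G : List (List (Int × Int))) (s : Int) (t : Int) (min : Int) (out : Bool) : Decidable (Spec_dfs G s t min out) := by unfold Spec_dfs; infer_instance

-- ===== CLAIM (what is proved, stated in full; the proofs are below) =====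
def Claim_equal_dfs : Prop := ∀ (G : List (List (Int × Int))) (s : Int) (t : Int) (min : Int), Dom_dfs G s t min → Pre_dfs G s t min → Spec_dfs G s t min (dfs G s t min)

-- ===== LEMMAS AND PROOFS =====

-- normalised (Python) index, meaningful under Raise.InRange
def nidx (n : Nat) (i : Int) : Nat := (PySem.List.pyIdx? n i).getD 0

-- threshold-filtered successor indices of vertex x in G
def succs (G : List (List (Int × Int))) (mn : Int) (x : Nat) : List Nat :=
  (G.getD x []).filterMap (fun uw => if mn ≤ uw.2 then some (nidx G.length uw.1) else none)

def Reach (G : List (List (Int × Int))) (mn : Int) (x y : Nat) : Prop :=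
  Relation.ReflTransGen (fun a b => b ∈ succs G mn a) x y

def Grows (a b : List Bool) : Prop :=
  b.length = a.length ∧ ∀ x : Nat, a[x]? = some true → b[x]? = some true

def ClosedAt (G : List (List (Int × Int))) (mn : Int) (vis : List Bool) (x : Nat) : Prop :=
  ∀ y ∈ succs G mn x, vis[y]? = some true

def ValidE (G : List (List (Int × Int))) : Prop :=
  ∀ adj ∈ G, ∀ uw ∈ adj, PySem.Raise.InRange G.length uw.1

def cf (vis : List Bool) : Nat := vis.count false

lemma pyIdx?_eq_nidx (n : Nat) (i : Int) (h : PySem.Raise.InRange n i) :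
    PySem.List.pyIdx? n i = some (nidx n i) := by
  obtain ⟨h1, h2⟩ := h
  unfold nidx PySem.List.pyIdx?
  split_ifs <;> simp_all <;> omega

lemma nidx_lt (n : Nat) (i : Int) (h : PySem.Raise.InRange n i) : nidx n i < n := by
  obtain ⟨h1, h2⟩ := h
  unfold nidx PySem.List.pyIdx?
  split_ifs <;> simp_all <;> omega

lemma pyGet?_eq (xs : List Bool) (i : Int) (h : PySem.Raise.InRange xs.length i) :
    PySem.List.pyGet? xs i = xs[nidx xs.length i]? := by
  simp [PySem.List.pyGet?, pyIdx?_eq_nidx _ _ h]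

lemma pySetD_eq (xs : List Bool) (i : Int) (v : Bool) (h : PySem.Raise.InRange xs.length i) :
    PySem.List.pySetD xs i v = xs.set (nidx xs.length i) v := by
  simp [PySem.List.pySetD, PySem.List.pySet?, pyIdx?_eq_nidx _ _ h]

lemma grows_refl (a : List Bool) : Grows a a := ⟨rfl, fun _ h => h⟩

lemma grows_trans {a b c : List Bool} (h1 : Grows a b) (h2 : Grows b c) : Grows a c :=
  ⟨h2.1.trans h1.1, fun x hx => h2.2 x (h1.2 x hx)⟩

lemma grows_set (xs : List Bool) (i : Nat) : Grows xs (xs.set i true) := by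
  refine ⟨by simp, fun x hx => ?_⟩
  rcases eq_or_ne x i with rfl | hne
  · have hlt : x < xs.length := by
      by_contra hge
      simp [List.getElem?_eq_none (le_of_not_gt hge)] at hx
    simp [hlt]
  · simpa [List.getElem?_set_ne (Ne.symm hne)] using hx

lemma grows_closedAt {G : List (List (Int × Int))} {mn : Int} {a b : List Bool} {x : Nat}
    (hab : Grows a b) (h : ClosedAt G mn a x) : ClosedAt G mn b x :=
  fun y hy => hab.2 y (h y hy)

lemma grows_cons {x y : Bool} {as bs : List Bool} (h : Grows (x :: as) (y :: bs)) :
    (x = true → y = true) ∧ Grows as bs := by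
  obtain ⟨hl, hp⟩ := h
  refine ⟨fun hx => by simpa using hp 0 (by simp [hx]), by simpa using hl, fun k hk => ?_⟩
  simpa using hp (k + 1) (by simpa using hk)

lemma cf_anti {a b : List Bool} (h : Grows a b) : cf b ≤ cf a := by
  induction a generalizing b with
  | nil =>
    have := h.1
    cases b <;> simp_all [cf]
  | cons x as ih =>
    cases b with
    | nil => simpa using h.1
    | cons y bs =>
      obtain ⟨hxy, hg⟩ := grows_cons h
      have hih := ih hg
      cases x with
      | false => cases y <;> simp [cf, List.count_cons] at hih ⊢ <;> omega
      | true =>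
        have hy := hxy rfl
        subst hy
        simp [cf, List.count_cons] at hih ⊢
        exact hih

lemma cf_set_lt {xs : List Bool} {i : Nat} (h : xs[i]? = some false) :
    cf (xs.set i true) < cf xs := by
  induction xs generalizing i with
  | nil => simp at h
  | cons x xs ih =>
    cases i with
    | zero =>
      simp at h
      subst h
      simp [cf, List.count_cons]
    | succ i =>
      simp at h
      have := ih h
      simp only [List.set_cons_succ]
      simp [cf, List.count_cons] at this ⊢
      omega

lemma cf_pos {xs : List Bool} {i : Nat} (h : xs[i]? = some false) : 0 < cf xs := by
  have hm : false ∈ xs := by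
    obtain ⟨hlt, he⟩ := List.getElem?_eq_some_iff.mp h
    exact he ▸ List.getElem_mem hlt
  simpa [cf, List.count_pos_iff] using hm

lemma cf_replicate (n : Nat) : cf (List.replicate n false) = n := by
  simp [cf]

lemma set_getElem?_true {xs : List Bool} {i : Nat} (h : i < xs.length) :
    (xs.set i true)[i]? = some true := by
  simp [h]

lemma set_split {xs : List Bool} {i x : Nat} (hx : (xs.set i true)[x]? = some true) :
    x = i ∨ xs[x]? = some true := by
  rcases eq_or_ne i x with rfl | hne
  · exact Or.inl rfl
  · right; rwa [List.getElem?_set_ne hne] at hx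

lemma adj_eq {G : List (List (Int × Int))} {v : Int} (h : PySem.Raise.InRange G.length v) :
    (PySem.List.pyGet? G v).getD [] = G.getD (nidx G.length v) [] := by
  have hlt := nidx_lt _ _ h
  simp [PySem.List.pyGet?, pyIdx?_eq_nidx _ _ h, List.getD, List.getElem?_eq_getElem hlt]

lemma adj_mem {G : List (List (Int × Int))} {x : Nat} (h : x < G.length) :
    G.getD x [] ∈ G := by
  have : G.getD x [] = G[x] := by simp [List.getD, List.getElem?_eq_getElem h]
  rw [this]; exact List.getElem_mem h

lemma mem_succs_iff {G : List (List (Int × Int))} {mn : Int} {x y : Nat} :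
    y ∈ succs G mn x ↔ ∃ uw ∈ G.getD x [], mn ≤ uw.2 ∧ nidx G.length uw.1 = y := by
  simp only [succs, List.mem_filterMap]
  constructor
  · rintro ⟨uw, h1, h2⟩
    by_cases hm : mn ≤ uw.2
    · exact ⟨uw, h1, hm, by simpa [hm] using h2⟩
    · simp [hm] at h2
  · rintro ⟨uw, h1, hm, h2⟩
    exact ⟨uw, h1, by simp [hm, h2]⟩

-- marked (as `some true`) entries sit at valid positions, and valid guards read as getElem?
lemma pyGet?_eq' {acc : List Bool} {u : Int} (hlen : acc.length = n)
    (hu : PySem.Raise.InRange n u) :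
    PySem.List.pyGet? acc u = acc[nidx n u]? := by
  subst hlen
  exact pyGet?_eq acc u hu

lemma pySetD_eq' {acc : List Bool} {u : Int} {v : Bool} (hlen : acc.length = n)
    (hu : PySem.Raise.InRange n u) :
    PySem.List.pySetD acc u v = acc.set (nidx n u) v := by
  subst hlen
  exact pySetD_eq acc u v hu

-- ==== A-side lemmas ====

lemma visitA_grows (G : List (List (Int × Int))) (mn : Int) :
    ∀ (f : Nat) (v : Int) (vis : List Bool), Grows vis (visitA G mn f v vis) := by
  intro f
  induction f with
  | zero => intro v vis; exact grows_refl _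
  | succ f ih =>
    intro v vis
    have h0 : Grows vis (PySem.List.pySetD vis v true) := by
      unfold PySem.List.pySetD PySem.List.pySet?
      cases h : PySem.List.pyIdx? vis.length v with
      | none => simpa [h] using grows_refl vis
      | some k => simpa [h] using grows_set vis k
    simp only [visitA]
    refine grows_trans h0 ?_
    generalize (PySem.List.pyGet? G v).getD [] = l
    generalize PySem.List.pySetD vis v true = acc
    induction l generalizing acc with
    | nil => exact grows_refl _
    | cons uw l ihl =>
      simp only [List.foldl_cons]
      refine grows_trans ?_ (ihl _)
      split_ifs with hg
      · exact ih uw.1 acc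
      · exact grows_refl _

lemma visitA_sound (G : List (List (Int × Int))) (mn : Int) (hG : ValidE G) :
    ∀ (f : Nat) (v : Int) (vis : List Bool), PySem.Raise.InRange G.length v →
      vis.length = G.length →
      ∀ x : Nat, (visitA G mn f v vis)[x]? = some true →
        vis[x]? = some true ∨ Reach G mn (nidx G.length v) x := by
  intro f
  induction f with
  | zero => intro v vis _ _ x hx; exact Or.inl hx
  | succ f ih =>
    intro v vis hv hlen x hx
    have hv' : PySem.Raise.InRange vis.length v := by rw [hlen]; exact hv
    have hvlt := nidx_lt _ _ hv
    have hadjG : G.getD (nidx G.length v) [] ∈ G := adj_mem hvlt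
    have hset : PySem.List.pySetD vis v true = vis.set (nidx G.length v) true := by
      rw [pySetD_eq _ _ _ hv', hlen]
    rw [show visitA G mn (f+1) v vis =
        (G.getD (nidx G.length v) []).foldl
          (fun acc uw =>
            if PySem.List.pyGet? acc uw.1 = some false ∧ mn ≤ uw.2 then
              visitA G mn f uw.1 acc
            else acc)
          (vis.set (nidx G.length v) true) by
      simp only [visitA]; rw [adj_eq hv, hset]] at hx
    have main : ∀ (l : List (Int × Int)), (∀ uw ∈ l, uw ∈ G.getD (nidx G.length v) []) →
        ∀ acc : List Bool, acc.length = G.length →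
        (∀ y : Nat, acc[y]? = some true → vis[y]? = some true ∨ Reach G mn (nidx G.length v) y) →
        ∀ y : Nat,
          (l.foldl (fun acc uw =>
            if PySem.List.pyGet? acc uw.1 = some false ∧ mn ≤ uw.2 then
              visitA G mn f uw.1 acc
            else acc) acc)[y]? = some true →
          vis[y]? = some true ∨ Reach G mn (nidx G.length v) y := by
      intro l
      induction l with
      | nil => intro _ acc _ hacc y hy; exact hacc y hy
      | cons uw l ihl =>
        intro hl acc haccLen hacc y hy
        simp only [List.foldl_cons] at hy
        by_cases hg : PySem.List.pyGet? acc uw.1 = some false ∧ mn ≤ uw.2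
        · rw [if_pos hg] at hy
          have huR : PySem.Raise.InRange G.length uw.1 :=
            hG _ hadjG _ (hl uw List.mem_cons_self)
          have hgrow := visitA_grows G mn f uw.1 acc
          have hlen' : (visitA G mn f uw.1 acc).length = G.length := hgrow.1.trans haccLen
          refine ihl (fun z hz => hl z (List.mem_cons_of_mem _ hz)) _ hlen' ?_ y hy
          intro z hz
          rcases ih uw.1 acc huR haccLen z hz with hzacc | hreach
          · exact hacc z hzacc
          · right
            refine Relation.ReflTransGen.head ?_ hreach
            exact mem_succs_iff.mpr ⟨uw, hl uw List.mem_cons_self, hg.2, rfl⟩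
        · rw [if_neg hg] at hy
          exact ihl (fun z hz => hl z (List.mem_cons_of_mem _ hz)) _ haccLen hacc y hy
    refine main _ (fun uw h => h) _ (by simp [hlen]) ?_ x hx
    intro y hy
    rcases set_split hy with rfl | hvy
    · exact Or.inr Relation.ReflTransGen.refl
    · exact Or.inl hvy

lemma visitA_complete (G : List (List (Int × Int))) (mn : Int) (hG : ValidE G) :
    ∀ (f : Nat) (v : Int) (vis : List Bool), PySem.Raise.InRange G.length v →
      vis.length = G.length → vis[nidx G.length v]? = some false → cf vis ≤ f →
      (∀ x : Nat, (visitA G mn f v vis)[x]? = some true →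
          vis[x]? = some true ∨ ClosedAt G mn (visitA G mn f v vis) x)
        ∧ (visitA G mn f v vis)[nidx G.length v]? = some true := by
  intro f
  induction f with
  | zero =>
    intro v vis _ _ hfalse hcf
    exact absurd hcf (by have := cf_pos hfalse; omega)
  | succ f ih =>
    intro v vis hv hlen hfalse hcf
    have hv' : PySem.Raise.InRange vis.length v := by rw [hlen]; exact hv
    have hvlt := nidx_lt _ _ hv
    have hadjG : G.getD (nidx G.length v) [] ∈ G := adj_mem hvlt
    have hset : PySem.List.pySetD vis v true = vis.set (nidx G.length v) true := by
      rw [pySetD_eq _ _ _ hv', hlen]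
    have hunfold : visitA G mn (f+1) v vis =
        (G.getD (nidx G.length v) []).foldl
          (fun acc uw =>
            if PySem.List.pyGet? acc uw.1 = some false ∧ mn ≤ uw.2 then
              visitA G mn f uw.1 acc
            else acc)
          (vis.set (nidx G.length v) true) := by
      simp only [visitA]; rw [adj_eq hv, hset]
    have hlen1 : (vis.set (nidx G.length v) true).length = G.length := by simp [hlen]
    have hcf1 : cf (vis.set (nidx G.length v) true) ≤ f := by
      have := cf_set_lt hfalse
      omega
    -- fold invariant, by induction on the scanned suffix of the adjacency list
    have inner : ∀ (l : List (Int × Int)), (∀ uw ∈ l, uw ∈ G.getD (nidx G.length v) []) →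
        ∀ acc : List Bool, acc.length = G.length → cf acc ≤ f →
        Grows acc (l.foldl (fun acc uw =>
            if PySem.List.pyGet? acc uw.1 = some false ∧ mn ≤ uw.2 then
              visitA G mn f uw.1 acc
            else acc) acc)
        ∧ ((∀ x : Nat, acc[x]? = some true →
              vis[x]? = some true ∨ x = nidx G.length v ∨ ClosedAt G mn acc x) →
            (∀ x : Nat, (l.foldl (fun acc uw =>
                if PySem.List.pyGet? acc uw.1 = some false ∧ mn ≤ uw.2 then
                  visitA G mn f uw.1 acc
                else acc) acc)[x]? = some true →
              vis[x]? = some true ∨ x = nidx G.length v ∨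
                ClosedAt G mn (l.foldl (fun acc uw =>
                  if PySem.List.pyGet? acc uw.1 = some false ∧ mn ≤ uw.2 then
                    visitA G mn f uw.1 acc
                  else acc) acc) x))
        ∧ (∀ uw ∈ l, mn ≤ uw.2 →
            (l.foldl (fun acc uw =>
              if PySem.List.pyGet? acc uw.1 = some false ∧ mn ≤ uw.2 then
                visitA G mn f uw.1 acc
              else acc) acc)[nidx G.length uw.1]? = some true) := by
      intro l
      induction l with
      | nil =>
        intro _ acc _ _
        exact ⟨grows_refl _, fun h => h, by simp⟩
      | cons uw l ihl =>
        intro hl acc haccLen hacccf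
        have hmem : uw ∈ G.getD (nidx G.length v) [] := hl uw List.mem_cons_self
        have huR : PySem.Raise.InRange G.length uw.1 := hG _ hadjG _ hmem
        have huLt := nidx_lt _ _ huR
        simp only [List.foldl_cons]
        by_cases hg : PySem.List.pyGet? acc uw.1 = some false ∧ mn ≤ uw.2
        · rw [if_pos hg]
          have huF : acc[nidx G.length uw.1]? = some false := by
            rw [← pyGet?_eq' haccLen huR]; exact hg.1
          have hstep := ih uw.1 acc huR haccLen huF hacccf
          have hgrow := visitA_grows G mn f uw.1 acc
          have hlen' : (visitA G mn f uw.1 acc).length = G.length := hgrow.1.trans haccLen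
          have hcf' : cf (visitA G mn f uw.1 acc) ≤ f := le_trans (cf_anti hgrow) hacccf
          obtain ⟨d1, d2, d3⟩ := ihl (fun z hz => hl z (List.mem_cons_of_mem _ hz)) _ hlen' hcf'
          refine ⟨grows_trans hgrow d1, fun hQ => d2 ?_, ?_⟩
          · intro x hx
            rcases hstep.1 x hx with hxacc | hcl
            · rcases hQ x hxacc with h1 | h2 | h3
              · exact Or.inl h1
              · exact Or.inr (Or.inl h2)
              · exact Or.inr (Or.inr (grows_closedAt hgrow h3))
            · exact Or.inr (Or.inr hcl)
          · intro uw' huw' hm'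
            rcases List.mem_cons.mp huw' with rfl | htail
            · exact d1.2 _ hstep.2
            · exact d3 uw' htail hm'
        · rw [if_neg hg]
          obtain ⟨d1, d2, d3⟩ := ihl (fun z hz => hl z (List.mem_cons_of_mem _ hz)) _ haccLen hacccf
          refine ⟨d1, d2, ?_⟩
          intro uw' huw' hm'
          rcases List.mem_cons.mp huw' with rfl | htail
          · -- guard failed but the weight passes: the entry was already marked
            have hne : ¬ PySem.List.pyGet? acc uw'.1 = some false := fun hcontra => hg ⟨hcontra, hm'⟩
            have : acc[nidx G.length uw'.1]? = some true := by
              have hsome : acc[nidx G.length uw'.1]? = some acc[nidx G.length uw'.1] :=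
                List.getElem?_eq_getElem (by omega : nidx G.length uw'.1 < acc.length)
            -- the stored Bool must be true
              rw [← pyGet?_eq' haccLen huR] at hsome ⊢
              cases hb : acc[nidx G.length uw'.1]'(by omega) with
              | false => exact absurd (by rw [hsome, hb]) hne
              | true => rw [hsome, hb]
            exact d1.2 _ this
          · exact d3 uw' htail hm'
    obtain ⟨c1, c2, c3⟩ := inner _ (fun uw h => h) _ hlen1 hcf1
    rw [hunfold]
    constructor
    · intro x hx
      have hQ0 : ∀ x : Nat, (vis.set (nidx G.length v) true)[x]? = some true →
          vis[x]? = some true ∨ x = nidx G.length v ∨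
            ClosedAt G mn (vis.set (nidx G.length v) true) x := by
        intro y hy
        rcases set_split hy with rfl | hvy
        · exact Or.inr (Or.inl rfl)
        · exact Or.inl hvy
      rcases c2 hQ0 x hx with h1 | h2 | h3
      · exact Or.inl h1
      · subst h2
        refine Or.inr ?_
        intro y hy
        obtain ⟨uw, humem, hm, hidx⟩ := mem_succs_iff.mp hy
        exact hidx ▸ c3 uw humem hm
      · exact Or.inr h3
    · exact c1.2 _ (set_getElem?_true (by omega))

-- ==== B-side lemmas ====

lemma bfsLoop_nil (G : List (List (Int × Int))) (mn : Int) (f : Nat) (r : List Bool) :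
    bfsLoop G mn f r [] = r := by cases f <;> simp [bfsLoop]

-- one frontier vertex: scanning its adjacency list marks exactly its eligible successors
lemma innerB (G : List (List (Int × Int))) (mn : Int) (hG : ValidE G) {v : Int}
    (hv : PySem.Raise.InRange G.length v) :
    ∀ (l : List (Int × Int)), (∀ uw ∈ l, uw ∈ G.getD (nidx G.length v) []) →
    ∀ st : List Bool × List Int, st.1.length = G.length →
    (∀ u ∈ st.2, PySem.Raise.InRange G.length u ∧ st.1[nidx G.length u]? = some true) →
    ∀ r, r = l.foldl (fun st2 uw =>
        if mn ≤ uw.2 ∧ PySem.List.pyGet? st2.1 uw.1 = some false then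
          (PySem.List.pySetD st2.1 uw.1 true, st2.2 ++ [uw.1])
        else st2) st →
      r.1.length = G.length ∧ Grows st.1 r.1 ∧ (∀ u ∈ st.2, u ∈ r.2) ∧
      cf r.1 + r.2.length ≤ cf st.1 + st.2.length ∧
      (∀ u ∈ r.2, PySem.Raise.InRange G.length u ∧ r.1[nidx G.length u]? = some true) ∧
      (∀ x : Nat, r.1[x]? = some true → st.1[x]? = some true ∨ ∃ u ∈ r.2, nidx G.length u = x) ∧
      (∀ uw ∈ l, mn ≤ uw.2 → r.1[nidx G.length uw.1]? = some true) := by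
  intro l
  induction l with
  | nil =>
    intro _ st hlen hst2 r hr
    subst hr
    exact ⟨hlen, grows_refl _, fun u hu => hu, le_refl _, hst2,
      fun x hx => Or.inl hx, by simp⟩
  | cons uw l ihl =>
    intro hl st hlen hst2 r hr
    have hmem : uw ∈ G.getD (nidx G.length v) [] := hl uw List.mem_cons_self
    have huR : PySem.Raise.InRange G.length uw.1 := hG _ (adj_mem (nidx_lt _ _ hv)) _ hmem
    have huLt := nidx_lt _ _ huR
    simp only [List.foldl_cons] at hr
    by_cases hg : mn ≤ uw.2 ∧ PySem.List.pyGet? st.1 uw.1 = some false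
    · rw [if_pos hg] at hr
      have hsetEq : PySem.List.pySetD st.1 uw.1 true = st.1.set (nidx G.length uw.1) true :=
        pySetD_eq' hlen huR
      have huF : st.1[nidx G.length uw.1]? = some false := by
        rw [← pyGet?_eq' hlen huR]; exact hg.2
      rw [hsetEq] at hr
      have hlen1 : (st.1.set (nidx G.length uw.1) true).length = G.length := by simp [hlen]
      have hg1 : Grows st.1 (st.1.set (nidx G.length uw.1) true) := grows_set _ _
      have hst2' : ∀ u ∈ st.2 ++ [uw.1], PySem.Raise.InRange G.length u ∧
          (st.1.set (nidx G.length uw.1) true)[nidx G.length u]? = some true := by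
        intro u hu
        rcases List.mem_append.mp hu with h1 | h1
        · exact ⟨(hst2 u h1).1, hg1.2 _ (hst2 u h1).2⟩
        · rcases List.mem_singleton.mp h1 with rfl
          exact ⟨huR, set_getElem?_true (by omega)⟩
      obtain ⟨d1, d2, d3, d4, d5, d6, d7⟩ :=
        ihl (fun z hz => hl z (List.mem_cons_of_mem _ hz)) _ hlen1 hst2' r hr
      have hcfd : cf (st.1.set (nidx G.length uw.1) true) < cf st.1 := cf_set_lt huF
      refine ⟨d1, grows_trans hg1 d2, ?_, ?_, d5, ?_, ?_⟩
      · intro u hu; exact d3 u (List.mem_append.mpr (Or.inl hu))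
      · have := d4
        simp only [List.length_append, List.length_singleton] at this
        omega
      · intro x hx
        rcases d6 x hx with h1 | h2
        · rcases set_split h1 with rfl | h3
          · exact Or.inr ⟨uw.1, d3 uw.1 (List.mem_append.mpr (Or.inr (List.mem_singleton_self _))), rfl⟩
          · exact Or.inl h3
        · exact Or.inr h2
      · intro uw' huw' hm'
        rcases List.mem_cons.mp huw' with rfl | htail
        · exact d2.2 _ (set_getElem?_true (by omega))
        · exact d7 uw' htail hm'
    · rw [if_neg hg] at hr
      obtain ⟨d1, d2, d3, d4, d5, d6, d7⟩ :=
        ihl (fun z hz => hl z (List.mem_cons_of_mem _ hz)) _ hlen hst2 r hr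
      refine ⟨d1, d2, d3, d4, d5, d6, ?_⟩
      intro uw' huw' hm'
      rcases List.mem_cons.mp huw' with rfl | htail
      · have hne : ¬ PySem.List.pyGet? st.1 uw'.1 = some false := fun hc => hg ⟨hm', hc⟩
        have hmarked : st.1[nidx G.length uw'.1]? = some true := by
          have hsome : st.1[nidx G.length uw'.1]? = some st.1[nidx G.length uw'.1] :=
            List.getElem?_eq_getElem (by omega)
          rw [← pyGet?_eq' hlen huR] at hsome ⊢
          cases hb : st.1[nidx G.length uw'.1]'(by omega) with
          | false => exact absurd (by rw [hsome, hb]) hne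
          | true => rw [hsome, hb]
        exact d2.2 _ hmarked
      · exact d7 uw' htail hm'

-- one whole while-round over the frontier
lemma midB (G : List (List (Int × Int))) (mn : Int) (hG : ValidE G) :
    ∀ (fl : List Int) (st : List Bool × List Int), st.1.length = G.length →
    (∀ v ∈ fl, PySem.Raise.InRange G.length v ∧ st.1[nidx G.length v]? = some true) →
    (∀ u ∈ st.2, PySem.Raise.InRange G.length u ∧ st.1[nidx G.length u]? = some true) →
    (∀ x : Nat, st.1[x]? = some true →
       (∃ v ∈ fl, nidx G.length v = x) ∨ (∃ u ∈ st.2, nidx G.length u = x) ∨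
         ClosedAt G mn st.1 x) →
    ∀ r, r = fl.foldl (stepB G mn) st →
      r.1.length = G.length ∧ Grows st.1 r.1 ∧
      cf r.1 + r.2.length ≤ cf st.1 + st.2.length ∧
      (∀ u ∈ r.2, PySem.Raise.InRange G.length u ∧ r.1[nidx G.length u]? = some true) ∧
      (∀ x : Nat, r.1[x]? = some true →
         (∃ u ∈ r.2, nidx G.length u = x) ∨ ClosedAt G mn r.1 x) := by
  intro fl
  induction fl with
  | nil =>
    intro st hlen _ hst2 hQ r hr
    subst hr
    refine ⟨hlen, grows_refl _, le_refl _, hst2, ?_⟩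
    intro x hx
    rcases hQ x hx with ⟨v, hv, _⟩ | h | h
    · exact absurd hv (List.not_mem_nil)
    · exact Or.inl h
    · exact Or.inr h
  | cons v fl ihl =>
    intro st hlen hfl hst2 hQ r hr
    have hv : PySem.Raise.InRange G.length v := (hfl v List.mem_cons_self).1
    simp only [List.foldl_cons] at hr
    have hstep : stepB G mn st v = (G.getD (nidx G.length v) []).foldl
        (fun st2 uw =>
          if mn ≤ uw.2 ∧ PySem.List.pyGet? st2.1 uw.1 = some false then
            (PySem.List.pySetD st2.1 uw.1 true, st2.2 ++ [uw.1])
          else st2) st := by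
      unfold stepB; rw [adj_eq hv]
    obtain ⟨i1, i2, i3, i4, i5, i6, i7⟩ :=
      innerB G mn hG hv _ (fun uw h => h) st hlen hst2 (stepB G mn st v) hstep
    have hQ1 : ∀ x : Nat, (stepB G mn st v).1[x]? = some true →
        (∃ v' ∈ fl, nidx G.length v' = x) ∨
        (∃ u ∈ (stepB G mn st v).2, nidx G.length u = x) ∨
        ClosedAt G mn (stepB G mn st v).1 x := by
      intro x hx
      rcases i6 x hx with h1 | h2
      · rcases hQ x h1 with ⟨v', hv', hvx⟩ | ⟨u, hu, hux⟩ | hcl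
        · rcases List.mem_cons.mp hv' with rfl | htail
          · subst hvx
            refine Or.inr (Or.inr ?_)
            intro y hy
            obtain ⟨uw, humem, hm, hidx⟩ := mem_succs_iff.mp hy
            exact hidx ▸ i7 uw humem hm
          · exact Or.inl ⟨v', htail, hvx⟩
        · exact Or.inr (Or.inl ⟨u, i3 u hu, hux⟩)
        · exact Or.inr (Or.inr (grows_closedAt i2 hcl))
      · exact Or.inr (Or.inl h2)
    obtain ⟨m1, m2, m3, m4, m5⟩ := ihl (stepB G mn st v) i1
      (fun v' hv' => ⟨(hfl v' (List.mem_cons_of_mem _ hv')).1,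
        i2.2 _ (hfl v' (List.mem_cons_of_mem _ hv')).2⟩)
      i5 hQ1 r hr
    exact ⟨m1, grows_trans i2 m2, le_trans m3 i4, m4, m5⟩

lemma bfs_complete (G : List (List (Int × Int))) (mn : Int) (hG : ValidE G) :
    ∀ (f : Nat) (reached : List Bool) (frontier : List Int),
      reached.length = G.length →
      (∀ v ∈ frontier, PySem.Raise.InRange G.length v ∧ reached[nidx G.length v]? = some true) →
      (∀ x : Nat, reached[x]? = some true →
          (∃ v ∈ frontier, nidx G.length v = x) ∨ ClosedAt G mn reached x) →
      cf reached + 1 ≤ f →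
      Grows reached (bfsLoop G mn f reached frontier) ∧
        ∀ x : Nat, (bfsLoop G mn f reached frontier)[x]? = some true →
          ClosedAt G mn (bfsLoop G mn f reached frontier) x := by
  intro f
  induction f with
  | zero => intro reached frontier _ _ _ hcf; omega
  | succ f ih =>
    intro reached frontier hlen hfr hQ hcf
    by_cases hfe : frontier = []
    · subst hfe
      rw [bfsLoop_nil]
      refine ⟨grows_refl _, ?_⟩
      intro x hx
      rcases hQ x hx with ⟨v, hv, _⟩ | h
      · exact absurd hv (List.not_mem_nil)
      · exact h
    · have hunf : bfsLoop G mn (f+1) reached frontier =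
          bfsLoop G mn f (frontier.foldl (stepB G mn) (reached, [])).1
            (frontier.foldl (stepB G mn) (reached, [])).2 := by
        simp [bfsLoop, hfe]
      obtain ⟨m1, m2, m3, m4, m5⟩ := midB G mn hG frontier (reached, []) hlen hfr
        (by intro u hu; exact absurd hu (List.not_mem_nil))
        (by
          intro x hx
          rcases hQ x hx with h | h
          · exact Or.inl h
          · exact Or.inr (Or.inr h))
        (frontier.foldl (stepB G mn) (reached, [])) rfl
      rw [hunf]
      by_cases hr2 : (frontier.foldl (stepB G mn) (reached, [])).2 = []
      · rw [hr2, bfsLoop_nil]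
        refine ⟨m2, ?_⟩
        intro x hx
        rcases m5 x hx with ⟨u, hu, _⟩ | h
        · rw [hr2] at hu; exact absurd hu (List.not_mem_nil)
        · exact h
      · have hpos : 1 ≤ (frontier.foldl (stepB G mn) (reached, [])).2.length :=
          List.length_pos_of_ne_nil hr2
        have hcf' : cf (frontier.foldl (stepB G mn) (reached, [])).1 + 1 ≤ f := by
          simp only [List.length_nil] at m3
          omega
        obtain ⟨g1, g2⟩ := ih _ _ m1 m4
          (by intro x hx; rcases m5 x hx with h | h; exact Or.inl h; exact Or.inr h) hcf'
        exact ⟨grows_trans m2 g1, g2⟩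

-- soundness of B: every marked vertex satisfies any step-closed predicate
lemma innerB_sound (G : List (List (Int × Int))) (mn : Int) (hG : ValidE G)
    (P : Nat → Prop) (hP : ∀ x y, P x → y ∈ succs G mn x → P y) {v : Int}
    (hv : PySem.Raise.InRange G.length v) (hPv : P (nidx G.length v)) :
    ∀ (l : List (Int × Int)), (∀ uw ∈ l, uw ∈ G.getD (nidx G.length v) []) →
    ∀ st : List Bool × List Int, st.1.length = G.length →
    (∀ x : Nat, st.1[x]? = some true → P x) →
    (∀ u ∈ st.2, PySem.Raise.InRange G.length u ∧ P (nidx G.length u)) →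
    ∀ r, r = l.foldl (fun st2 uw =>
        if mn ≤ uw.2 ∧ PySem.List.pyGet? st2.1 uw.1 = some false then
          (PySem.List.pySetD st2.1 uw.1 true, st2.2 ++ [uw.1])
        else st2) st →
      r.1.length = G.length ∧ (∀ x : Nat, r.1[x]? = some true → P x) ∧
      (∀ u ∈ r.2, PySem.Raise.InRange G.length u ∧ P (nidx G.length u)) := by
  intro l
  induction l with
  | nil =>
    intro _ st hlen h1 h2 r hr
    subst hr
    exact ⟨hlen, h1, h2⟩
  | cons uw l ihl =>
    intro hl st hlen h1 h2 r hr
    have hmem : uw ∈ G.getD (nidx G.length v) [] := hl uw List.mem_cons_self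
    have huR : PySem.Raise.InRange G.length uw.1 := hG _ (adj_mem (nidx_lt _ _ hv)) _ hmem
    have hPu : P (nidx G.length uw.1) → True := fun _ => trivial
    simp only [List.foldl_cons] at hr
    by_cases hg : mn ≤ uw.2 ∧ PySem.List.pyGet? st.1 uw.1 = some false
    · rw [if_pos hg] at hr
      rw [pySetD_eq' hlen huR] at hr
      have hPnew : P (nidx G.length uw.1) :=
        hP _ _ hPv (mem_succs_iff.mpr ⟨uw, hmem, hg.1, rfl⟩)
      refine ihl (fun z hz => hl z (List.mem_cons_of_mem _ hz)) _ (by simp [hlen]) ?_ ?_ r hr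
      · intro x hx
        rcases set_split hx with rfl | h
        · exact hPnew
        · exact h1 x h
      · intro u hu
        rcases List.mem_append.mp hu with h | h
        · exact h2 u h
        · rcases List.mem_singleton.mp h with rfl
          exact ⟨huR, hPnew⟩
    · rw [if_neg hg] at hr
      exact ihl (fun z hz => hl z (List.mem_cons_of_mem _ hz)) _ hlen h1 h2 r hr

lemma bfs_sound (G : List (List (Int × Int))) (mn : Int) (hG : ValidE G)
    (P : Nat → Prop) (hP : ∀ x y, P x → y ∈ succs G mn x → P y) :
    ∀ (f : Nat) (reached : List Bool) (frontier : List Int),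
      reached.length = G.length →
      (∀ x : Nat, reached[x]? = some true → P x) →
      (∀ v ∈ frontier, PySem.Raise.InRange G.length v ∧ P (nidx G.length v)) →
      ∀ x : Nat, (bfsLoop G mn f reached frontier)[x]? = some true → P x := by
  intro f
  induction f with
  | zero => intro reached frontier _ h1 _ x hx; exact h1 x hx
  | succ f ih =>
    intro reached frontier hlen h1 hfr x hx
    by_cases hfe : frontier = []
    · subst hfe; rw [bfsLoop_nil] at hx; exact h1 x hx
    · rw [show bfsLoop G mn (f+1) reached frontier =
          bfsLoop G mn f (frontier.foldl (stepB G mn) (reached, [])).1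
            (frontier.foldl (stepB G mn) (reached, [])).2 by simp [bfsLoop, hfe]] at hx
      -- propagate the invariant through the round
      have hmid : ∀ (fl : List Int), (∀ v ∈ fl, PySem.Raise.InRange G.length v ∧
            P (nidx G.length v)) →
          ∀ st : List Bool × List Int, st.1.length = G.length →
          (∀ y : Nat, st.1[y]? = some true → P y) →
          (∀ u ∈ st.2, PySem.Raise.InRange G.length u ∧ P (nidx G.length u)) →
          ∀ r, r = fl.foldl (stepB G mn) st →
            r.1.length = G.length ∧ (∀ y : Nat, r.1[y]? = some true → P y) ∧
            (∀ u ∈ r.2, PySem.Raise.InRange G.length u ∧ P (nidx G.length u)) := by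
        intro fl
        induction fl with
        | nil => intro _ st hl h1' h2' r hr; subst hr; exact ⟨hl, h1', h2'⟩
        | cons v fl ihf =>
          intro hfl st hl h1' h2' r hr
          simp only [List.foldl_cons] at hr
          have hv := (hfl v List.mem_cons_self).1
          have hPv := (hfl v List.mem_cons_self).2
          have hstep : stepB G mn st v = (G.getD (nidx G.length v) []).foldl
              (fun st2 uw =>
                if mn ≤ uw.2 ∧ PySem.List.pyGet? st2.1 uw.1 = some false then
                  (PySem.List.pySetD st2.1 uw.1 true, st2.2 ++ [uw.1])
                else st2) st := by
            unfold stepB; rw [adj_eq hv]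
          obtain ⟨j1, j2, j3⟩ := innerB_sound G mn hG P hP hv hPv _ (fun z h => h) st hl
            h1' h2' (stepB G mn st v) hstep
          exact ihf (fun v' hv' => hfl v' (List.mem_cons_of_mem _ hv')) _ j1 j2 j3 r hr
      obtain ⟨k1, k2, k3⟩ := hmid frontier hfr (reached, []) hlen h1
        (by intro u hu; exact absurd hu (List.not_mem_nil)) _ rfl
      exact ih _ _ k1 k2 k3 x hx

lemma reach_marked {G : List (List (Int × Int))} {mn : Int} {r : List Bool} {x0 : Nat}
    (h0 : r[x0]? = some true)
    (hcl : ∀ x : Nat, r[x]? = some true → ClosedAt G mn r x) :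
    ∀ x : Nat, Reach G mn x0 x → r[x]? = some true := by
  intro x hx
  induction hx with
  | refl => exact h0
  | tail _ hstep ih => exact hcl _ ih _ hstep

-- ===== VERDICT (by name: the statement is the Claim_ definition above) =====
theorem dfs_spec : Claim_equal_dfs := by
  intro G s t mn _ hpre
  obtain ⟨hs, ht, hG⟩ := hpre
  unfold Spec_dfs dfs dfs_alt
  have hslt := nidx_lt _ _ hs
  have htlt := nidx_lt _ _ ht
  have hrepl : (List.replicate G.length false).length = G.length := by simp
  have hrepl_get : ∀ x : Nat, x < G.length →
      (List.replicate G.length false)[x]? = some false := by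
    intro x hx; simp [List.getElem?_replicate, hx]
  have hrepl_true : ∀ x : Nat, ¬ ((List.replicate G.length false)[x]? = some true) := by
    intro x hx
    by_cases hxl : x < G.length
    · rw [hrepl_get x hxl] at hx; exact absurd hx (by simp)
    · rw [List.getElem?_eq_none (by simp; omega)] at hx; exact absurd hx (by simp)
  -- A-side characterisation
  have hcompA := visitA_complete G mn hG (G.length + 1) s (List.replicate G.length false)
    hs hrepl (hrepl_get _ hslt) (by rw [cf_replicate]; omega)
  have hgrowsA := visitA_grows G mn (G.length + 1) s (List.replicate G.length false)
  have hlenA : (visitA G mn (G.length + 1) s (List.replicate G.length false)).length = G.length :=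
    hgrowsA.1.trans hrepl
  have hclA : ∀ x : Nat,
      (visitA G mn (G.length + 1) s (List.replicate G.length false))[x]? = some true →
      ClosedAt G mn (visitA G mn (G.length + 1) s (List.replicate G.length false)) x := by
    intro x hx
    rcases hcompA.1 x hx with h | h
    · exact absurd h (hrepl_true x)
    · exact h
  have charA : ∀ x : Nat,
      (visitA G mn (G.length + 1) s (List.replicate G.length false))[x]? = some true ↔
      Reach G mn (nidx G.length s) x := by
    intro x
    constructor
    · intro hx
      rcases visitA_sound G mn hG (G.length + 1) s _ hs hrepl x hx with h | h
      · exact absurd h (hrepl_true x)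
      · exact h
    · exact fun h => reach_marked hcompA.2 hclA x h
  -- B-side characterisation
  have hsR : PySem.Raise.InRange (List.replicate G.length false).length s := by
    rw [hrepl]; exact hs
  have hset0 : PySem.List.pySetD (List.replicate G.length false) s true =
      (List.replicate G.length false).set (nidx G.length s) true := by
    rw [pySetD_eq _ _ _ hsR, hrepl]
  have hlen0 : ((List.replicate G.length false).set (nidx G.length s) true).length = G.length := by
    simp
  have hmark0 : ((List.replicate G.length false).set (nidx G.length s) true)[nidx G.length s]? =
      some true := set_getElem?_true (by simp; omega)
  have h0Q : ∀ x : Nat,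
      ((List.replicate G.length false).set (nidx G.length s) true)[x]? = some true →
      x = nidx G.length s := by
    intro x hx
    rcases set_split hx with h | h
    · exact h
    · exact absurd h (hrepl_true x)
  have hcompB := bfs_complete G mn hG (G.length + 1)
    ((List.replicate G.length false).set (nidx G.length s) true) [s] hlen0
    (by
      intro v hv
      rcases List.mem_singleton.mp hv with rfl
      exact ⟨hs, hmark0⟩)
    (by
      intro x hx
      exact Or.inl ⟨s, List.mem_singleton_self _, (h0Q x hx).symm⟩)
    (by
      have := cf_anti (grows_set (List.replicate G.length false) (nidx G.length s))
      rw [cf_replicate] at this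
      omega)
  have hlenB : (bfsLoop G mn (G.length + 1)
      ((List.replicate G.length false).set (nidx G.length s) true) [s]).length = G.length :=
    hcompB.1.1.trans hlen0
  have hmarkB : (bfsLoop G mn (G.length + 1)
      ((List.replicate G.length false).set (nidx G.length s) true) [s])[nidx G.length s]? =
      some true := hcompB.1.2 _ hmark0
  have charB : ∀ x : Nat,
      (bfsLoop G mn (G.length + 1)
        ((List.replicate G.length false).set (nidx G.length s) true) [s])[x]? = some true ↔
      Reach G mn (nidx G.length s) x := by
    intro x
    constructor
    · intro hx
      refine bfs_sound G mn hG (Reach G mn (nidx G.length s))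
        (fun a b ha hb => ha.tail hb) (G.length + 1) _ [s] hlen0 ?_ ?_ x hx
      · intro y hy
        rw [h0Q y hy]
        exact Relation.ReflTransGen.refl
      · intro v hv
        rcases List.mem_singleton.mp hv with rfl
        exact ⟨hs, Relation.ReflTransGen.refl⟩
    · exact fun h => reach_marked hmarkB hcompB.2 x h
  -- read off the answer at t
  rw [hset0]
  show (PySem.List.pyGet? (visitA G mn (G.length + 1) s (List.replicate G.length false)) t).getD false =
    (PySem.List.pyGet? (bfsLoop G mn (G.length + 1)
      ((List.replicate G.length false).set (nidx G.length s) true) [s]) t).getD false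
  have htA : PySem.Raise.InRange
      (visitA G mn (G.length + 1) s (List.replicate G.length false)).length t := by
    rw [hlenA]; exact ht
  have htB : PySem.Raise.InRange (bfsLoop G mn (G.length + 1)
      ((List.replicate G.length false).set (nidx G.length s) true) [s]).length t := by
    rw [hlenB]; exact ht
  rw [pyGet?_eq _ t htA, pyGet?_eq _ t htB, hlenA, hlenB]
  obtain ⟨a, ha⟩ : ∃ a, (visitA G mn (G.length + 1) s
      (List.replicate G.length false))[nidx G.length t]? = some a :=
    ⟨_, List.getElem?_eq_getElem (by omega)⟩
  obtain ⟨b, hb⟩ : ∃ b, (bfsLoop G mn (G.length + 1)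
      ((List.replicate G.length false).set (nidx G.length s) true) [s])[nidx G.length t]? =
      some b := ⟨_, List.getElem?_eq_getElem (by omega)⟩
  rw [ha, hb]
  have hab : a = b := by
    cases a with
    | true =>
      have := (charB (nidx G.length t)).mpr ((charA (nidx G.length t)).mp ha)
      rw [hb] at this
      cases b
      · exact absurd this (by simp)
      · rfl
    | false =>
      cases b with
      | false => rfl
      | true =>
        have := (charA (nidx G.length t)).mpr ((charB (nidx G.length t)).mp hb)
        rw [ha] at this
        exact absurd this (by simp)
  rw [hab]
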